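-- pv_equiv track=rewrite | github.com/Mauro-CVO/HackerRank2 | Python_HackerRank/pruebas.py | hor
-- ===== SOURCE A (Python) =====
-- def hor(table,queen):
--     horizon = []
--     for i in range(len(table)):
--         for j in range(len(table)):
--             if queen[0] == i:
--                 coord = [i,j]
--                 horizon.append(coord)
--     return horizon
-- ===== SOURCE B (Python) =====
-- def hor(table, queen):
--     if not table:
--         return []
--     q = queen[0]
--     if 0 <= q < len(table):
--         return [[q, j] for j in range(len(table))]
--     return []
-- ===== Notes on version B (the rewrite author's own statement) =====
-- stated objective: faster
-- what changed: Replaced the O(n^2) double loop (which appends [q,j] n times while scanning all i) by a single range-check on queen[0] followed by one O(n) comprehension over the columns.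
import Mathlib
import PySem

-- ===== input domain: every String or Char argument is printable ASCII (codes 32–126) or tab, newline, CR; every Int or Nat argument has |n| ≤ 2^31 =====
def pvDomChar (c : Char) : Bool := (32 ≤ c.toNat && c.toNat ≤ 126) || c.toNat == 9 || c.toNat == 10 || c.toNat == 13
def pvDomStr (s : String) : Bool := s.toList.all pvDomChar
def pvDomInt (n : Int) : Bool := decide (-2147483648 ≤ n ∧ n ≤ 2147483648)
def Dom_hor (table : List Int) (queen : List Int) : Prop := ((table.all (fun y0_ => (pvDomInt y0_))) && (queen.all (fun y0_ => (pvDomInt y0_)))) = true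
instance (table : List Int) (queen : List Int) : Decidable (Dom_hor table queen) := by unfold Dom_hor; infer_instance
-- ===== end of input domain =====

-- B replaces A's O(n^2) double loop by one range-check on queen[0] and a single pass over the columns.

-- ===== PORT A =====
def hor (table : List Int) (queen : List Int) : List (List Int) :=
  (PySem.List.pyRange 0 table.length 1).foldl (fun horizon i =>
    (PySem.List.pyRange 0 table.length 1).foldl (fun h j =>
      if (PySem.List.pyGet? queen 0).getD 0 = i then h ++ [[i, j]] else h) horizon) []

-- ===== PORT B =====
def hor_alt (table : List Int) (queen : List Int) : List (List Int) :=
  if table = [] then []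
  else
    let q := (PySem.List.pyGet? queen 0).getD 0
    if 0 ≤ q ∧ q < (table.length : Int) then
      (PySem.List.pyRange 0 table.length 1).map (fun j => [q, j])
    else []

-- ===== PRECONDITION & SPEC =====
-- A raises IndexError (queen[0]) exactly when table ≠ [] and queen = []; those inputs are excluded.
def Pre_hor (table : List Int) (queen : List Int) : Prop := table = [] ∨ queen ≠ []
instance (table : List Int) (queen : List Int) : Decidable (Pre_hor table queen) := by unfold Pre_hor; infer_instance
def pvWitness_hor : List Int × List Int := ([0, 1, 2], [1])
def Spec_hor (table : List Int) (queen : List Int) (out : List (List Int)) : Prop := out = hor_alt table queen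
instance (table : List Int) (queen : List Int) (out : List (List Int)) : Decidable (Spec_hor table queen out) := by unfold Spec_hor; infer_instance

-- ===== CLAIM (what is proved, stated in full; the proofs are below) =====
def Claim_equal_hor : Prop := ∀ (table : List Int) (queen : List Int), Dom_hor table queen → Pre_hor table queen → Spec_hor table queen (hor table queen)

-- ===== LEMMAS AND PROOFS =====

-- the inner loop: appends [i,j] for every j when q = i, otherwise does nothing
lemma inner_fold (q i : Int) (l : List Int) (acc : List (List Int)) :
    l.foldl (fun h j => if q = i then h ++ [[i, j]] else h) acc
      = if q = i then acc ++ l.map (fun j => [i, j]) else acc := by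
  induction l generalizing acc with
  | nil => simp
  | cons x xs ih =>
    simp only [List.foldl_cons]
    by_cases h : q = i
    · rw [if_pos h, ih, if_pos h, if_pos h]; simp
    · rw [if_neg h, ih, if_neg h, if_neg h]

-- the outer loop: only the (at most one) i = q in the range contributes
lemma outer_fold (q : Int) (F : Int → List (List Int)) (l : List Int) (acc : List (List Int))
    (hl : l.Nodup) :
    l.foldl (fun acc i => if q = i then acc ++ F i else acc) acc
      = if q ∈ l then acc ++ F q else acc := by
  induction l generalizing acc with
  | nil => simp
  | cons x xs ih =>
    simp only [List.foldl_cons, List.mem_cons]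
    rcases List.nodup_cons.mp hl with ⟨hx, hxs⟩
    by_cases h : q = x
    · subst h
      rw [ih _ hxs]
      simp [hx]
    · rw [if_neg h, ih _ hxs]
      simp [h]

-- ===== VERDICT (by name: the statement is the Claim_ definition above) =====
theorem hor_spec : Claim_equal_hor := by
  intro table queen _ _
  unfold Spec_hor hor hor_alt
  set q := (PySem.List.pyGet? queen 0).getD 0 with hq
  have hstep :
      (PySem.List.pyRange 0 table.length 1).foldl (fun horizon i =>
        (PySem.List.pyRange 0 table.length 1).foldl (fun h j =>
          if q = i then h ++ [[i, j]] else h) horizon) []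
        = (PySem.List.pyRange 0 table.length 1).foldl (fun acc i =>
            if q = i then acc ++ (PySem.List.pyRange 0 table.length 1).map (fun j => [i, j]) else acc) [] := by
    apply PySem.List.foldl_congr_mem
    intro acc i _
    exact inner_fold q i _ acc
  rw [hstep, outer_fold q _ _ _ (PySem.List.nodup_pyRange_one 0 table.length)]
  have hm : q ∈ PySem.List.pyRange 0 (table.length : Int) 1 ↔ 0 ≤ q ∧ q < (table.length : Int) :=
    PySem.List.mem_pyRange_one
  by_cases ht : table = []
  · simp [ht]
  · by_cases hmem : 0 ≤ q ∧ q < (table.length : Int)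
    · simp only [if_pos (hm.mpr hmem), if_neg ht, if_pos hmem, List.nil_append]
    · simp only [if_neg (fun h => hmem (hm.mp h)), if_neg ht, if_neg hmem]
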